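-- pv_equiv track=rewrite | github.com/mic47/platypus-invoices | make_invoice.py | sanitize_long_words
-- ===== SOURCE A (Python) =====
-- def sanitize_long_words(sentence: str, word_len_limit: int):
--     words = sentence.split(" ")
--     out = []
--     for word in words:
--         ww = []
--         while len(word) > word_len_limit:
--             ww.append(word[:word_len_limit])
--             word = word[word_len_limit:]
--         ww.append(word)
--         out.append("&#8203;".join(ww))
--     return " ".join(out)
-- ===== SOURCE B (Python) =====
-- def sanitize_long_words(sentence: str, word_len_limit: int):
--     out = []
--     for w in sentence.split(" "):
--         if len(w) <= word_len_limit: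
--             out.append(w)
--         else:
--             out.append("&#8203;".join(w[i:i + word_len_limit]
--                                       for i in range(0, len(w), word_len_limit)))
--     return " ".join(out)
-- ===== Notes on version B (the rewrite author's own statement) =====
-- stated objective: alternative
-- what changed: Instead of repeatedly re-slicing the shrinking tail of each long word in a while-loop, B slices each word into fixed-size chunks in one pass over range(0, len(w), limit), copying each chunk directly.
import Mathlib
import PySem

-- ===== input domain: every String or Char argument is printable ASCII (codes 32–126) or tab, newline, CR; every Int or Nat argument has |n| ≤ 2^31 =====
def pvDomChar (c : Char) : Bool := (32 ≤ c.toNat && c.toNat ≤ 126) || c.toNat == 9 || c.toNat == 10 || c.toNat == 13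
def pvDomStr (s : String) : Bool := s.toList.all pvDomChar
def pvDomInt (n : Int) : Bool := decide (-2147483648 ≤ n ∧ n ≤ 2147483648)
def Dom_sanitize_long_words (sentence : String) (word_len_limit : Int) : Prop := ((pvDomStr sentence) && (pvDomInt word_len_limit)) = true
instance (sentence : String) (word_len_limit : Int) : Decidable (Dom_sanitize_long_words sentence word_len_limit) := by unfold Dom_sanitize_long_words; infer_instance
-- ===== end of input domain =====

-- B replaces A's while-loop that re-slices the shrinking tail of each long word by one pass of
-- fixed-size chunks over range(0, len(w), limit).

-- ===== PORT A =====
-- A's 'while len(word) > word_len_limit' loop, ported with fuel = the word's length: under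
-- Pre_ (limit ≥ 1, or limit = 0 with every word empty) the loop runs fewer than length times,
-- so the fuel never runs out on an admitted input; the fuel-0 branch performs the same
-- 'ww.append(word)' as the loop exit.
def pvLoopA (word_len_limit : Int) : Nat → List Char → List (List Char) → List (List Char)
  | 0, word, ww => ww ++ [word]
  | fuel+1, word, ww =>
      if word_len_limit < (word.length : Int) then
        pvLoopA word_len_limit fuel (PySem.List.slice word (some word_len_limit) none)
          (ww ++ [PySem.List.slice word none (some word_len_limit)])
      else
        ww ++ [word]

def sanitize_long_words (sentence : String) (word_len_limit : Int) : String :=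
  let words := PySem.Chars.splitOn sentence.toList [' ']
  let out : List (List Char) := words.foldl
    (fun out word =>
      out ++ [PySem.Chars.join "&#8203;".toList (pvLoopA word_len_limit word.length word [])]) []
  String.ofList (PySem.Chars.join [' '] out)

-- ===== PORT B =====
-- '"&#8203;".join(w[i:i+k] for i in range(0, len(w), k))'
def pvChunksB (w : List Char) (k : Int) : List (List Char) :=
  (PySem.List.pyRange 0 (w.length : Int) k).map (fun i => PySem.List.slice w (some i) (some (i + k)))

def sanitize_long_words_alt (sentence : String) (word_len_limit : Int) : String :=
  String.ofList (PySem.Chars.join [' ']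
    ((PySem.Chars.splitOn sentence.toList [' ']).map (fun w =>
      if (w.length : Int) ≤ word_len_limit then w
      else PySem.Chars.join "&#8203;".toList (pvChunksB w word_len_limit))))

-- ===== PRECONDITION & SPEC =====
-- For word_len_limit ≤ 0 A's while-loop never terminates on any non-empty word; the only
-- non-positive-limit inputs on which A returns are word_len_limit = 0 with a spaces-only
-- sentence (every word empty), and those stay inside Pre_.
def Pre_sanitize_long_words (sentence : String) (word_len_limit : Int) : Prop :=
  1 ≤ word_len_limit ∨ (word_len_limit = 0 ∧ ∀ c ∈ sentence.toList, c = ' ')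

instance (sentence : String) (word_len_limit : Int) : Decidable (Pre_sanitize_long_words sentence word_len_limit) := by
  unfold Pre_sanitize_long_words; infer_instance

def pvWitness_sanitize_long_words : String × Int := ("hello world", 3)

def Spec_sanitize_long_words (sentence : String) (word_len_limit : Int) (out : String) : Prop := out = sanitize_long_words_alt sentence word_len_limit
instance (sentence : String) (word_len_limit : Int) (out : String) : Decidable (Spec_sanitize_long_words sentence word_len_limit out) := by unfold Spec_sanitize_long_words; infer_instance

-- ===== CLAIM (what is proved, stated in full; the proofs are below) =====
def Claim_equal_sanitize_long_words : Prop := ∀ (sentence : String) (word_len_limit : Int), Dom_sanitize_long_words sentence word_len_limit → Pre_sanitize_long_words sentence word_len_limit → Spec_sanitize_long_words sentence word_len_limit (sanitize_long_words sentence word_len_limit)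

-- ===== LEMMAS AND PROOFS =====

-- One chunk only: for 0 < |w| ≤ k the range is [0] and the single slice is w itself.
lemma pvChunksB_of_le (w : List Char) (k : Int) (hk : 1 ≤ k) (h0 : w ≠ [])
    (h : (w.length : Int) ≤ k) : pvChunksB w k = [w] := by
  have hn : 0 < (w.length : Int) := by
    have := List.length_pos_iff.mpr h0; exact_mod_cast this
  have hdiv : ((w.length : Int) - 0 + k - 1) / k = 1 := by
    have h1 : (w.length : Int) - 0 + k - 1 = (w.length - 1) + 1 * k := by ring
    rw [h1, Int.add_mul_ediv_right _ _ (by omega : k ≠ 0),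
        Int.ediv_eq_zero_of_lt (by omega) (by omega)]
    omega
  unfold pvChunksB
  rw [PySem.List.pyRange_of_pos _ _ (by omega), if_pos hn, hdiv]
  simp only [show ((1:Int).toNat = 1) from rfl, List.range_one, List.map_cons, List.map_nil]
  rw [show ((0:Int) + k*(0:Nat) + k) = k by push_cast; ring,
      show ((0:Int) + k*(0:Nat)) = 0 by push_cast; ring]
  rw [PySem.List.slice_zero_start, PySem.List.slice_to w (by omega : (0:Int) ≤ k),
      List.take_of_length_le (by omega : w.length ≤ k.toNat)]

-- Peeling one chunk: for |w| > k ≥ 1 the range splits as 0 :: (k + range of the tail).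
lemma pvChunksB_unfold (w : List Char) (k : Int) (hk : 1 ≤ k) (h : k < (w.length : Int)) :
    pvChunksB w k = w.take k.toNat :: pvChunksB (w.drop k.toNat) k := by
  have hn : 0 < (w.length : Int) := by omega
  have hlen' : ((w.drop k.toNat).length : Int) = (w.length : Int) - k := by
    simp [List.length_drop]; omega
  have hc : ((w.length : Int) - 0 + k - 1) / k
      = (((w.length : Int) - k) - 0 + k - 1) / k + 1 := by
    have h1 : (w.length : Int) - 0 + k - 1 = (((w.length : Int) - k) - 0 + k - 1) + 1 * k := by ring
    rw [h1, Int.add_mul_ediv_right _ _ (by omega : k ≠ 0)]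
  have hc0 : 0 ≤ (((w.length : Int) - k) - 0 + k - 1) / k :=
    Int.ediv_nonneg (by omega) (by omega)
  unfold pvChunksB
  rw [hlen', PySem.List.pyRange_of_pos _ _ (by omega : (0:Int) < k),
      PySem.List.pyRange_of_pos _ _ (by omega : (0:Int) < k),
      if_pos hn, if_pos (by omega : (0:Int) < (w.length : Int) - k), hc,
      show ((((w.length : Int) - k) - 0 + k - 1) / k + 1).toNat
          = ((((w.length : Int) - k) - 0 + k - 1) / k).toNat + 1 by omega,
      List.range_succ_eq_map]
  simp only [List.map_cons, List.map_map, Function.comp_def, Nat.succ_eq_add_one]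
  congr 1
  · rw [show ((0:Int) + k*(0:Nat) + k) = k by push_cast; ring,
        show ((0:Int) + k*(0:Nat)) = 0 by push_cast; ring,
        PySem.List.slice_zero_start, PySem.List.slice_to w (by omega : (0:Int) ≤ k)]
  · apply List.map_congr_left
    intro j _
    have hkj : (0:Int) ≤ k * (j:Int) := by positivity
    rw [show ((0:Int) + k * ((j:Nat)+1 : Nat)) = k * (j:Int) + k by push_cast; ring]
    rw [show ((0:Int) + k * (j:Int)) = k * (j:Int) by ring]
    rw [PySem.List.slice_toNat _ (by omega) (by omega),
        PySem.List.slice_toNat _ (by omega) (by omega)]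
    rw [List.drop_drop]
    congr 1
    · omega
    · congr 1; omega

-- A's loop, accumulator generalized, equals B's per-word chunking.
lemma pvLoopA_eq (k : Int) (hk : 1 ≤ k) :
    ∀ (fuel : Nat) (w : List Char) (acc : List (List Char)), w.length ≤ fuel + k.toNat →
      pvLoopA k fuel w acc =
        acc ++ (if (w.length : Int) ≤ k then [w] else pvChunksB w k) := by
  intro fuel
  induction fuel with
  | zero =>
    intro w acc hle
    have hle' : (w.length : Int) ≤ k := by omega
    simp [pvLoopA, hle']
  | succ fuel ih =>
    intro w acc hle
    by_cases hgt : k < (w.length : Int)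
    · have hne : ¬ ((w.length : Int) ≤ k) := by omega
      simp only [pvLoopA, if_pos hgt, if_neg hne]
      rw [PySem.List.slice_from w (by omega : (0:Int) ≤ k),
          PySem.List.slice_to w (by omega : (0:Int) ≤ k)]
      rw [ih _ _ (by simp [List.length_drop]; omega)]
      rw [pvChunksB_unfold w k hk hgt]
      have hlen' : ((w.drop k.toNat).length : Int) = (w.length : Int) - k := by
        simp [List.length_drop]; omega
      by_cases h2 : ((w.drop k.toNat).length : Int) ≤ k
      · have hne' : w.drop k.toNat ≠ [] := by
          intro hnil
          rw [hnil] at hlen'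
          simp at hlen'; omega
        rw [if_pos h2, pvChunksB_of_le _ k hk hne' h2]
        simp
      · rw [if_neg h2]
        simp
    · simp only [pvLoopA, if_neg hgt, if_pos (by omega : (w.length : Int) ≤ k)]

-- Per-word agreement for a positive limit.
lemma pvWord_eq (k : Int) (hk : 1 ≤ k) (w : List Char) :
    PySem.Chars.join "&#8203;".toList (pvLoopA k w.length w []) =
      if (w.length : Int) ≤ k then w
      else PySem.Chars.join "&#8203;".toList (pvChunksB w k) := by
  rw [pvLoopA_eq k hk w.length w [] (by omega), List.nil_append]
  split_ifs with h
  · exact PySem.Chars.join_singleton _ w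
  · rfl

-- On an all-space input every piece produced by split(" ")'s worker is empty.
lemma pv_go_all_space : ∀ (fuel : Nat) (l cur : List Char) (acc : List (List Char)),
    l.length ≤ fuel → (∀ c ∈ l, c = ' ') → cur = [] → (∀ p ∈ acc, p = []) →
    ∀ p ∈ PySem.Chars.splitOn.go [' '] fuel l cur acc, p = [] := by
  intro fuel
  induction fuel with
  | zero =>
    intro l cur acc hfl hl hcur hacc p hp
    have hlnil : l = [] := by
      cases l with
      | nil => rfl
      | cons c rest => simp at hfl
    subst hlnil; subst hcur
    unfold PySem.Chars.splitOn.go at hp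
    simp at hp
    rcases hp with hp | hp
    · exact hacc p hp
    · exact hp
  | succ fuel ih =>
    intro l cur acc hfl hl hcur hacc p hp
    cases l with
    | nil =>
      unfold PySem.Chars.splitOn.go at hp
      subst hcur
      simp at hp
      rcases hp with hp | hp
      · exact hacc p hp
      · exact hp
    | cons c rest =>
      unfold PySem.Chars.splitOn.go at hp
      have hc : c = ' ' := hl c (by simp)
      have hpref : List.isPrefixOf [' '] (c :: rest) = true := by
        subst hc; simp [List.isPrefixOf]
      rw [if_pos hpref] at hp
      subst hcur
      refine ih _ _ _ (by simp at hfl ⊢; omega) (fun d hd => hl d ?_) rfl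
        (fun q hq => ?_) p hp
      · simp at hd ⊢; right; exact hd
      · simp at hq
        rcases hq with hq | hq
        · exact hq
        · exact hacc q hq

-- ===== VERDICT (by name: the statement is the Claim_ definition above) =====
theorem sanitize_long_words_spec : Claim_equal_sanitize_long_words := by
  intro sentence k _hdom hpre
  unfold Spec_sanitize_long_words
  unfold Pre_sanitize_long_words at hpre
  unfold sanitize_long_words sanitize_long_words_alt
  dsimp only
  rw [PySem.List.foldl_append_singleton_eq_map, List.nil_append]
  congr 1
  congr 1
  apply List.map_congr_left
  intro w hw
  rcases hpre with hk | ⟨hk0, hsp⟩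
  · exact pvWord_eq k hk w
  · have hwnil : w = [] :=
      pv_go_all_space (sentence.toList.length + 1) sentence.toList [] []
        (by omega) hsp rfl (by simp) w hw
    subst hwnil hk0
    simp [pvLoopA, PySem.Chars.join_singleton]
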